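-- pv_equiv track=rewrite | github.com/kibnakamoto/ECC | gf2m_curves.py | int_to_poly
-- ===== SOURCE A (Python) =====
-- def int_to_poly(x:int):
--     bits = bin(x)[2:]
--     lenbits = len(bits)
--     poly = set()
--     for i in range(lenbits):
--         if bits[i] == '1':
--             poly.add(lenbits-i)
--     return poly
-- ===== SOURCE B (Python) =====
-- def int_to_poly(x: int):
--     # recursive halving: the polynomial of n is the polynomial of n//2 with all
--     # exponents shifted up by one, plus exponent 1 when n is odd
--     def go(n):
--         if n == 0:
--             return set()
--         return {e + 1 for e in go(n // 2)} | ({1} if n % 2 else set())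
--     return go(abs(x))
-- ===== Notes on version B (the rewrite author's own statement) =====
-- stated objective: alternative
-- what changed: B replaces A's left-to-right scan over the characters of bin(x) by recursion on the halved integer: the polynomial of n is the polynomial of the half with every exponent incremented, united with the lowest exponent when n is odd, so no bit string and no positional loop exist at all.
import Mathlib
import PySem

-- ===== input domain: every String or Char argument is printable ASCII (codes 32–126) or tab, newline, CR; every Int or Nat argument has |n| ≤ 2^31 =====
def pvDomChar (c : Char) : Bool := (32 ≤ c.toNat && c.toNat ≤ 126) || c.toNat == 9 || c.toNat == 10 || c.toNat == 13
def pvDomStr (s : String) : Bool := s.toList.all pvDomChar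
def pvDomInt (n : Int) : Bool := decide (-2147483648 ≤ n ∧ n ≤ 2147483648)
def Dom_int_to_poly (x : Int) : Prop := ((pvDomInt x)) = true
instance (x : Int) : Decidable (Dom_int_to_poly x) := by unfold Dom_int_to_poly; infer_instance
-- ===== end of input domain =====

-- B replaces A's character scan over bin(x) by a divide-by-two recursion on the integer:
-- poly(n) = {e+1 for e in poly(n//2)} | ({1} if n odd); an alternative of the same cost.

-- ===== PORT A =====
def int_to_poly (x : Int) : List Int :=
  let bits : List Char := PySem.List.slice (PySem.Int.toBinChars0b x) (some 2) none
  let lenbits : Int := PySem.List.len bits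
  (PySem.List.pyRange 0 lenbits 1).foldl
    (fun poly i =>
      if PySem.List.pyGetD bits i ' ' = '1' then PySem.Set.add poly (lenbits - i) else poly)
    (PySem.Set.empty : PySem.Set Int)

-- ===== PORT B =====
-- go's argument is abs(x), always ≥ 0, so it is a Nat here; Python's n // 2 and n % 2
-- on a nonnegative int coincide with Nat division and mod.
def int_to_poly_altGo (n : Nat) : PySem.Set Int :=
  if h : n = 0 then PySem.Set.empty
  else
    -- {e + 1 for e in go(n // 2)}  (map by +1, injective, so set order is determined)
    let s : PySem.Set Int := PySem.Set.ofList ((int_to_poly_altGo (n / 2)).map (· + 1))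
    -- … | ({1} if n % 2 else set())
    if n % 2 = 1 then PySem.Set.union s [(1 : Int)] else s
termination_by n
decreasing_by exact Nat.div_lt_self (Nat.pos_of_ne_zero h) one_lt_two

def int_to_poly_alt (x : Int) : List Int :=
  int_to_poly_altGo |x|.toNat

-- ===== PRECONDITION & SPEC =====
def Spec_int_to_poly (x : Int) (out : List Int) : Prop := out = int_to_poly_alt x
instance (x : Int) (out : List Int) : Decidable (Spec_int_to_poly x out) := by unfold Spec_int_to_poly; infer_instance

-- ===== CLAIM (what is proved, stated in full; the proofs are below) =====
def Claim_equal_int_to_poly : Prop := ∀ (x : Int), Dom_int_to_poly x → Spec_int_to_poly x (int_to_poly x)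

-- ===== LEMMAS AND PROOFS =====

def pvExps (n : Nat) : List Int :=
  if h : n = 0 then []
  else (pvExps (n / 2)).map (· + 1) ++ (if n % 2 = 1 then [1] else [])
termination_by n
decreasing_by exact Nat.div_lt_self (Nat.pos_of_ne_zero h) one_lt_two

def pvBits (n : Nat) : List Char :=
  if n < 2 then [Nat.digitChar (n % 2)]
  else pvBits (n / 2) ++ [Nat.digitChar (n % 2)]
termination_by n
decreasing_by exact Nat.div_lt_self (by omega) one_lt_two

def pvPick : List Char → List Int
  | [] => []
  | c :: t => (if c = '1' then [((t.length : Int) + 1)] else []) ++ pvPick t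

theorem pvPick_bounds : ∀ (L : List Char), ∀ b ∈ pvPick L, 1 ≤ b ∧ b ≤ (L.length : Int) := by
  intro L
  induction L with
  | nil => simp [pvPick]
  | cons c t ih =>
    intro b hb
    simp only [pvPick, List.mem_append] at hb
    rcases hb with hb | hb
    · split at hb <;> simp at hb
      subst hb; refine ⟨by omega, by simp⟩
    · have := ih b hb
      simp only [List.length_cons]
      push_cast
      omega

theorem pvToDigitsCore_eq : ∀ (f n : Nat) (acc : List Char), n < f →
    Nat.toDigitsCore 2 f n acc = pvBits n ++ acc := by
  intro f
  induction f with
  | zero => omega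
  | succ f ih =>
    intro n acc h
    rw [Nat.toDigitsCore]
    by_cases h2 : n < 2
    · have : n / 2 = 0 := by omega
      rw [pvBits]
      simp [this, h2]
    · have hne : ¬ n / 2 = 0 := by omega
      simp only [hne, if_false]
      rw [ih (n / 2) _ (by omega)]
      conv_rhs => rw [pvBits]
      simp [h2]

theorem pvToDigits_two (n : Nat) : Nat.toDigits 2 n = pvBits n := by
  rw [Nat.toDigits, pvToDigitsCore_eq (n+1) n [] (by omega), List.append_nil]

theorem pvFold_eq : ∀ (L : List Char) (acc : List Int), (∀ b ∈ pvPick L, b ∉ acc) →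
    (List.range L.length).foldl
      (fun poly i =>
        if L.getD i ' ' = '1' then PySem.Set.add poly ((L.length : Int) - (i : Int)) else poly)
      acc = acc ++ pvPick L := by
  intro L
  induction L with
  | nil => intro acc _; simp [pvPick]
  | cons c t ih =>
    intro acc hacc
    rw [List.length_cons, List.range_succ_eq_map, List.foldl_cons, List.foldl_map]
    rw [PySem.List.foldl_congr_mem (List.range t.length) _
          (fun poly i => if t.getD i ' ' = '1' then PySem.Set.add poly ((t.length : Int) - (i : Int)) else poly) _
          (by
            intro poly i _
            have harith : (((t.length + 1 : Nat)) : Int) - ((Nat.succ i : Nat) : Int) = (t.length : Int) - (i : Int) := by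
              push_cast; ring
            rw [harith, List.getD_cons_succ])]
    rw [List.getD_cons_zero]
    by_cases hc : c = '1'
    · have hv : (if c = '1' then PySem.Set.add acc (((t.length + 1 : Nat) : Int) - ((0 : Nat) : Int)) else acc)
          = PySem.Set.add acc ((t.length : Int) + 1) := by
        rw [if_pos hc]; norm_num
      have hmem : ((t.length : Int) + 1) ∉ acc := by
        apply hacc; simp [pvPick, hc]
      have hadd : PySem.Set.add acc ((t.length : Int) + 1) = acc ++ [(t.length : Int) + 1] := by
        simp [PySem.Set.add, PySem.Set.contains, hmem]
      rw [hv, hadd, ih (acc ++ [(t.length : Int) + 1]) ?_]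
      · simp [pvPick, hc]
      · intro b hb
        have hbd := pvPick_bounds t b hb
        have : b ∉ acc := hacc b (by simp [pvPick, hb])
        simp only [List.mem_append, List.mem_singleton, not_or]
        exact ⟨this, by omega⟩
    · rw [if_neg hc, ih acc (fun b hb => hacc b (by simp [pvPick, hb, hc]))]
      simp [pvPick, hc]

theorem pvPick_append_singleton (u : List Char) (d : Char) :
    pvPick (u ++ [d]) = (pvPick u).map (· + 1) ++ (if d = '1' then [1] else []) := by
  induction u with
  | nil => simp only [List.nil_append, pvPick, List.map_nil]; split <;> simp
  | cons c u ih =>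
    simp only [List.cons_append, pvPick, ih, List.map_append, List.length_append]
    split <;> simp

theorem pvPick_pvBits (n : Nat) : pvPick (pvBits n) = pvExps n := by
  induction n using Nat.strong_induction_on with
  | _ n ih =>
    by_cases h2 : n < 2
    · interval_cases n <;> simp [pvBits, pvPick, pvExps] <;> decide
    · rw [pvBits, if_neg h2, pvPick_append_singleton, ih (n / 2) (by omega)]
      conv_rhs => rw [pvExps]
      rw [dif_neg (by omega : ¬ n = 0)]
      rcases Nat.mod_two_eq_zero_or_one n with h | h <;> simp [h, Nat.digitChar]

theorem pvSliceTwo (xs : List Char) : PySem.List.slice xs (some 2) none = xs.drop 2 := by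
  have := PySem.List.slice_from_natCast xs 2
  simpa using this

theorem pvA_fold (x : Int) :
    int_to_poly x = pvPick (PySem.List.slice (PySem.Int.toBinChars0b x) (some 2) none) := by
  unfold int_to_poly
  dsimp only
  set L := PySem.List.slice (PySem.Int.toBinChars0b x) (some 2) none with hL
  rw [PySem.List.len_eq, PySem.List.pyRange_zero_natCast, List.foldl_map]
  have hbody : ∀ (poly : List Int), ∀ i ∈ List.range L.length,
      (if PySem.List.pyGetD L ((i : Nat) : Int) ' ' = '1'
        then PySem.Set.add poly ((L.length : Int) - ((i : Nat) : Int)) else poly)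
      = (if L.getD i ' ' = '1' then PySem.Set.add poly ((L.length : Int) - (i : Int)) else poly) := by
    intro poly i _
    rw [PySem.List.pyGetD_natCast]
  rw [PySem.List.foldl_congr_mem _ _ _ _ hbody]
  exact pvFold_eq L PySem.Set.empty (by simp [PySem.Set.empty])

theorem pvA_eq (x : Int) : int_to_poly x = pvExps x.natAbs := by
  rw [pvA_fold]
  by_cases hx : x < 0
  · rw [PySem.Int.toBinChars0b, if_pos hx, pvSliceTwo]
    show pvPick ('b' :: Nat.toDigits 2 x.natAbs) = _
    rw [show pvPick ('b' :: Nat.toDigits 2 x.natAbs) = pvPick (Nat.toDigits 2 x.natAbs) by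
          simp [pvPick]]
    rw [pvToDigits_two, pvPick_pvBits]
  · rw [PySem.Int.toBinChars0b, if_neg hx, pvSliceTwo]
    show pvPick (Nat.toDigits 2 x.toNat) = _
    rw [pvToDigits_two, pvPick_pvBits, show x.toNat = x.natAbs by omega]

theorem pvExps_lb (n : Nat) : ∀ b ∈ pvExps n, 1 ≤ b := by
  induction n using Nat.strong_induction_on with
  | _ n ih =>
    intro b hb
    rw [pvExps] at hb
    split at hb
    · simp at hb
    · rename_i h0
      rcases List.mem_append.mp hb with hb | hb
      · rcases List.mem_map.mp hb with ⟨a, ha, rfl⟩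
        have := ih (n / 2) (Nat.div_lt_self (Nat.pos_of_ne_zero h0) one_lt_two) a ha
        omega
      · split at hb <;> simp at hb
        omega

theorem pvExps_nodup (n : Nat) : (pvExps n).Nodup := by
  induction n using Nat.strong_induction_on with
  | _ n ih =>
    rw [pvExps]
    split
    · simp
    · rename_i h0
      have hmap : ((pvExps (n / 2)).map (· + 1)).Nodup :=
        (ih (n / 2) (Nat.div_lt_self (Nat.pos_of_ne_zero h0) one_lt_two)).map
          (fun a b h => by omega)
      split
      · refine List.Nodup.append hmap (by simp) ?_
        intro b hb
        rcases List.mem_map.mp hb with ⟨a, ha, rfl⟩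
        have := pvExps_lb (n / 2) a ha
        simp
        omega
      · simpa using hmap

theorem pvB_go_eq (n : Nat) : int_to_poly_altGo n = pvExps n := by
  induction n using Nat.strong_induction_on with
  | _ n ih =>
    rw [int_to_poly_altGo, pvExps]
    by_cases h0 : n = 0
    · simp [h0, PySem.Set.empty]
    · rw [dif_neg h0, dif_neg h0, ih (n / 2) (Nat.div_lt_self (Nat.pos_of_ne_zero h0) one_lt_two)]
      have hmap : ((pvExps (n / 2)).map (· + 1)).Nodup :=
        (pvExps_nodup (n / 2)).map (fun a b h => by omega)
      have hofl : PySem.Set.ofList ((pvExps (n / 2)).map (· + 1))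
          = (pvExps (n / 2)).map (· + 1) :=
        PySem.Set.ofList_eq_self_of_nodup _ hmap
      have h1 : (1 : Int) ∉ (pvExps (n / 2)).map (· + 1) := by
        intro h
        rcases List.mem_map.mp h with ⟨a, ha, hv⟩
        have := pvExps_lb (n / 2) a ha
        omega
      dsimp only
      rw [hofl]
      rcases Nat.mod_two_eq_zero_or_one n with h | h
      · simp [h]
      · rw [if_pos h, if_pos h]
        simp [PySem.Set.union, PySem.Set.update, PySem.Set.add, PySem.Set.contains, h1]

theorem pvB_eq (x : Int) : int_to_poly_alt x = pvExps x.natAbs := by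
  unfold int_to_poly_alt
  rw [show |x|.toNat = x.natAbs by rcases abs_cases x with ⟨h, _⟩ | ⟨h, _⟩ <;> omega]
  exact pvB_go_eq x.natAbs

-- ===== VERDICT (by name: the statement is the Claim_ definition above) =====
theorem int_to_poly_spec : Claim_equal_int_to_poly := by
  intro x _
  unfold Spec_int_to_poly
  rw [pvA_eq, pvB_eq]
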